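-- pv_equiv track=rewrite | github.com/tsuru7/algorithm-study | AtCoder/ABC259/C.py | solve
-- ===== SOURCE A (Python) =====
-- def solve(s,t):
--     ss = []
--     ss.append([s[0], 1])
--     for i in range(1, len(s)):
--         si = s[i]
--         ci, _ = ss[-1]
--         if si == ci:
--             ss[-1][1] += 1
--         else:
--             ss.append([si, 1])
--     tt = []
--     tt.append([t[0], 1])
--     for i in range(1, len(t)):
--         ti = t[i]
--         ci, _ = tt[-1]
--         if ti == ci:
--             tt[-1][1] += 1
--         else:
--             tt.append([ti, 1])
--     if len(ss) != len(tt):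
--         return 'No'
--     for (si, sn), (ti, tn) in zip(ss, tt):
--         if si != ti:
--             return 'No'
--         if sn == tn:
--             continue
--         if sn == 1 or tn == 1:
--             return 'No'
--         if tn < sn:
--             return 'No'
--     return 'Yes'
-- ===== SOURCE B (Python) =====
-- def solve(s, t):
--     i = j = 0
--     n, m = len(s), len(t)
--     while i < n and j < m:
--         c = s[i]
--         i0 = i
--         while i < n and s[i] == c:
--             i += 1
--         d = t[j]
--         j0 = j
--         while j < m and t[j] == d:
--             j += 1
--         if c != d:
--             return 'No'
--         a = i - i0
--         b = j - j0
--         if a != b and (a < 2 or b < a):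
--             return 'No'
--     if i < n or j < m:
--         return 'No'
--     return 'Yes'
-- ===== Notes on version B (the rewrite author's own statement) =====
-- stated objective: alternative
-- what changed: Instead of materialising both run-length-encoded lists, checking lengths and zipping them, B does a single interleaved two-pointer pass over the raw strings, judging each run pair on the fly with no intermediate lists.
import Mathlib
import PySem

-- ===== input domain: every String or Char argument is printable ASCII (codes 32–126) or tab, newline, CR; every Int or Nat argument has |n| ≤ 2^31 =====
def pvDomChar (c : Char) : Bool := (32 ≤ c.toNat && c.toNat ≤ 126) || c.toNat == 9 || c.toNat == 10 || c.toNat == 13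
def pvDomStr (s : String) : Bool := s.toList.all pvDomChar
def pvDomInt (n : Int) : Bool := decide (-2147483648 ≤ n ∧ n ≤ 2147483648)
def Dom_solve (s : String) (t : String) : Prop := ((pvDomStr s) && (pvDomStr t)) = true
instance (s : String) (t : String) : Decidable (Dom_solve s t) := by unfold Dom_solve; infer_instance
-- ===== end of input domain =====

-- B replaces A's "materialise both run-length encodings, compare lengths, zip" with one
-- interleaved two-pointer pass over the raw strings (no intermediate lists); same cost class.

-- ===== PORT A =====

-- ss[-1][1] += 1 : increment the count of the last run in place
def bumpLast : List (Char × Int) → List (Char × Int)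
  | [] => []
  | [(c, n)] => [(c, n + 1)]
  | x :: xs => x :: bumpLast xs

-- the body of A's run-building for-loop (ss[-1] is the last element; Pre_ keeps ss nonempty)
def stepA (ss : List (Char × Int)) (si : Char) : List (Char × Int) :=
  match ss.getLast? with
  | some (ci, _) => if si = ci then bumpLast ss else ss ++ [(si, 1)]
  | none => ss

-- A's final for-loop over zip(ss, tt) with its early returns
def zipLoopA : List ((Char × Int) × (Char × Int)) → String
  | [] => "Yes"
  | ((si, sn), (ti, tn)) :: rest =>
    if si ≠ ti then "No"
    else if sn = tn then zipLoopA rest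
    else if sn = 1 ∨ tn = 1 then "No"
    else if tn < sn then "No"
    else zipLoopA rest

def solve (s : String) (t : String) : String :=
  match s.toList, t.toList with
  | a :: as, b :: bs =>
    let ss := as.foldl stepA [(a, 1)]
    let tt := bs.foldl stepA [(b, 1)]
    if ss.length ≠ tt.length then "No" else zipLoopA (ss.zip tt)
  | _, _ => "No"   -- unreachable under Pre_solve: Python A raises IndexError on an empty string

-- ===== PORT B =====

-- the inner while loop: count of the current run (including the seed char c) and the rest
def runSplit (c : Char) : List Char → Int × List Char
  | [] => (1, [])
  | x :: xs => if x = c then let p := runSplit c xs; (p.1 + 1, p.2) else (1, x :: xs)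

theorem runSplit_len_le (c : Char) (l : List Char) : (runSplit c l).2.length ≤ l.length := by
  induction l with
  | nil => simp [runSplit]
  | cons x xs ih =>
    simp only [runSplit]
    split
    · exact Nat.le_succ_of_le ih
    · simp

-- B's outer while loop, on the unread suffixes of s and t
def loopB : List Char → List Char → String
  | [], [] => "Yes"
  | [], _ :: _ => "No"
  | _ :: _, [] => "No"
  | c :: cs, d :: ds =>
    let ps := runSplit c cs
    let pt := runSplit d ds
    if c ≠ d then "No"
    else if ps.1 ≠ pt.1 ∧ (ps.1 < 2 ∨ pt.1 < ps.1) then "No"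
    else loopB ps.2 pt.2
termination_by l _ => l.length
decreasing_by exact Nat.lt_succ_of_le (runSplit_len_le c cs)

def solve_alt (s : String) (t : String) : String := loopB s.toList t.toList

-- ===== PRECONDITION & SPEC =====
-- Pre_ excludes exactly the inputs where Python A raises IndexError (s[0] / t[0] on an empty string).
def Pre_solve (s : String) (t : String) : Prop := s ≠ "" ∧ t ≠ ""
instance (s : String) (t : String) : Decidable (Pre_solve s t) := by unfold Pre_solve; infer_instance
def pvWitness_solve : String × String := ("aab", "aaab")

def Spec_solve (s : String) (t : String) (out : String) : Prop := out = solve_alt s t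
instance (s : String) (t : String) (out : String) : Decidable (Spec_solve s t out) := by unfold Spec_solve; infer_instance

-- ===== CLAIM (what is proved, stated in full; the proofs are below) =====
def Claim_equal_solve : Prop := ∀ (s : String) (t : String), Dom_solve s t → Pre_solve s t → Spec_solve s t (solve s t)

-- ===== LEMMAS AND PROOFS =====

-- canonical run-length encoding, the common language of the two proofs
def rle : List Char → List (Char × Int)
  | [] => []
  | c :: cs => (c, (runSplit c cs).1) :: rle (runSplit c cs).2
termination_by l => l.length
decreasing_by exact Nat.lt_succ_of_le (runSplit_len_le c cs)

theorem rle_nil : rle [] = [] := by rw [rle.eq_def]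

theorem rle_cons (c : Char) (cs : List Char) :
    rle (c :: cs) = (c, (runSplit c cs).1) :: rle (runSplit c cs).2 := by rw [rle.eq_def]

-- A's run builder, recast head-first
def rleAux (c : Char) (n : Int) : List Char → List (Char × Int)
  | [] => [(c, n)]
  | x :: xs => if x = c then rleAux c (n + 1) xs else (c, n) :: rleAux x 1 xs

theorem one_le_runSplit_fst (c : Char) (l : List Char) : 1 ≤ (runSplit c l).1 := by
  induction l with
  | nil => simp [runSplit]
  | cons x xs ih =>
    simp only [runSplit]
    split
    · simpa using by omega
    · simp

theorem rleAux_eq_rle (c : Char) (n : Int) (l : List Char) :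
    rleAux c n l = (c, n - 1 + (runSplit c l).1) :: rle (runSplit c l).2 := by
  induction l generalizing c n with
  | nil => simp [rleAux, runSplit, rle_nil]
  | cons x xs ih =>
    by_cases h : x = c
    · subst h
      rw [rleAux, if_pos rfl, ih]
      simp [runSplit]
    · rw [rleAux, if_neg h, ih]
      simp only [runSplit, if_neg h]
      rw [rle_cons]
      norm_num

theorem getLast?_append_single (acc : List (Char × Int)) (p : Char × Int) :
    (acc ++ [p]).getLast? = some p := by
  simp

theorem bumpLast_append_single (acc : List (Char × Int)) (c : Char) (n : Int) :
    bumpLast (acc ++ [(c, n)]) = acc ++ [(c, n + 1)] := by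
  induction acc with
  | nil => simp [bumpLast]
  | cons x xs ih =>
    cases xs with
    | nil => simp [bumpLast]
    | cons y ys => simpa [bumpLast] using ih

theorem foldl_stepA (l : List Char) (acc : List (Char × Int)) (c : Char) (n : Int) :
    List.foldl stepA (acc ++ [(c, n)]) l = acc ++ rleAux c n l := by
  induction l generalizing acc c n with
  | nil => simp [rleAux]
  | cons x xs ih =>
    simp only [List.foldl_cons, stepA, getLast?_append_single]
    by_cases h : x = c
    · rw [if_pos h, bumpLast_append_single, ih, rleAux, if_pos h]
    · rw [if_neg h, ih, rleAux, if_neg h]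
      simp

theorem buildA_eq_rle (a : Char) (l : List Char) :
    List.foldl stepA [(a, 1)] l = rle (a :: l) := by
  have := foldl_stepA l [] a 1
  simp only [List.nil_append] at this
  rw [this, rleAux_eq_rle, rle_cons]
  norm_num

-- counts produced by rle are ≥ 1
theorem rle_counts_pos : ∀ (l : List Char), ∀ p ∈ rle l, 1 ≤ p.2
  | [] => by simp [rle_nil]
  | c :: cs => by
    rw [rle_cons]
    intro p hp
    rcases List.mem_cons.1 hp with h | h
    · subst h; exact one_le_runSplit_fst c cs
    · exact rle_counts_pos (runSplit c cs).2 p h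
termination_by l => l.length
decreasing_by exact Nat.lt_succ_of_le (runSplit_len_le c cs)

-- A's length-check + zip loop equals the lazy pairwise comparison, given positive counts
def cmpRuns : List (Char × Int) → List (Char × Int) → String
  | [], [] => "Yes"
  | [], _ :: _ => "No"
  | _ :: _, [] => "No"
  | (si, sn) :: ss, (ti, tn) :: tt =>
    if si ≠ ti then "No"
    else if sn ≠ tn ∧ (sn < 2 ∨ tn < sn) then "No"
    else cmpRuns ss tt

theorem cmpA_eq_cmpRuns (ss tt : List (Char × Int))
    (hs : ∀ p ∈ ss, 1 ≤ p.2) (ht : ∀ p ∈ tt, 1 ≤ p.2) :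
    (if ss.length ≠ tt.length then "No" else zipLoopA (ss.zip tt)) = cmpRuns ss tt := by
  induction ss generalizing tt with
  | nil => cases tt <;> simp [zipLoopA, cmpRuns]
  | cons x xs ih =>
    obtain ⟨si, sn⟩ := x
    cases tt with
    | nil => simp [cmpRuns]
    | cons y ys =>
      obtain ⟨ti, tn⟩ := y
      have hsn : 1 ≤ sn := hs _ (List.mem_cons_self ..)
      have htn : 1 ≤ tn := ht _ (List.mem_cons_self ..)
      have ihx := ih ys (fun p hp => hs p (List.mem_cons_of_mem _ hp))
        (fun p hp => ht p (List.mem_cons_of_mem _ hp))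
      by_cases hl : xs.length = ys.length
      · have ihx' : zipLoopA (xs.zip ys) = cmpRuns xs ys := by simpa [hl] using ihx
        have hL : ¬ ((si, sn) :: xs).length ≠ ((ti, tn) :: ys).length := by simp [hl]
        rw [if_neg hL, List.zip_cons_cons]
        simp only [zipLoopA, cmpRuns]
        by_cases hc : si = ti
        · have hcne : ¬ si ≠ ti := by simp [hc]
          rw [if_neg hcne, if_neg hcne]
          by_cases he : sn = tn
          · have hbne : ¬ (sn ≠ tn ∧ (sn < 2 ∨ tn < sn)) := by omega
            rw [if_pos he, if_neg hbne, ihx']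
          · rw [if_neg he]
            by_cases hb : sn ≠ tn ∧ (sn < 2 ∨ tn < sn)
            · rw [if_pos hb]
              by_cases hb1 : sn = 1 ∨ tn = 1
              · rw [if_pos hb1]
              · have hb2 : tn < sn := by omega
                rw [if_neg hb1, if_pos hb2]
            · rw [if_neg hb]
              have hb1 : ¬ (sn = 1 ∨ tn = 1) := by omega
              have hb2 : ¬ tn < sn := by omega
              rw [if_neg hb1, if_neg hb2, ihx']
        · rw [if_pos hc, if_pos hc]
      · have ihx' : "No" = cmpRuns xs ys := by simpa [hl] using ihx
        have hL : ((si, sn) :: xs).length ≠ ((ti, tn) :: ys).length := by simp [hl]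
        rw [if_pos hL]
        simp only [cmpRuns]
        by_cases hc : si = ti
        · have hcne : ¬ si ≠ ti := by simp [hc]
          rw [if_neg hcne]
          by_cases hb : sn ≠ tn ∧ (sn < 2 ∨ tn < sn)
          · rw [if_pos hb]
          · rw [if_neg hb, ← ihx']
        · rw [if_pos hc]

theorem loopB_nil_nil : loopB [] [] = "Yes" := by rw [loopB.eq_def]

theorem loopB_nil_cons (d : Char) (ds : List Char) : loopB [] (d :: ds) = "No" := by
  rw [loopB.eq_def]

theorem loopB_cons_nil (c : Char) (cs : List Char) : loopB (c :: cs) [] = "No" := by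
  rw [loopB.eq_def]

theorem loopB_cons_cons (c : Char) (cs : List Char) (d : Char) (ds : List Char) :
    loopB (c :: cs) (d :: ds) =
      (if c ≠ d then "No"
       else if (runSplit c cs).1 ≠ (runSplit d ds).1 ∧
           ((runSplit c cs).1 < 2 ∨ (runSplit d ds).1 < (runSplit c cs).1) then "No"
       else loopB (runSplit c cs).2 (runSplit d ds).2) := by
  rw [loopB.eq_def]

-- B's interleaved pass computes the lazy comparison of the two encodings
theorem loopB_eq_cmpRuns : ∀ (l r : List Char), loopB l r = cmpRuns (rle l) (rle r)
  | [], [] => by simp [loopB_nil_nil, rle_nil, cmpRuns]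
  | [], _ :: ds => by rw [loopB_nil_cons, rle_nil, rle_cons]; rfl
  | _ :: cs, [] => by rw [loopB_cons_nil, rle_nil, rle_cons]; rfl
  | c :: cs, d :: ds => by
    rw [loopB_cons_cons, rle_cons, rle_cons]
    simp only [cmpRuns]
    have hrec := loopB_eq_cmpRuns (runSplit c cs).2 (runSplit d ds).2
    by_cases hc : c = d
    · subst hc
      have hcne : ¬ c ≠ c := by simp
      rw [if_neg hcne, if_neg hcne]
      by_cases hb : (runSplit c cs).1 ≠ (runSplit c ds).1 ∧
          ((runSplit c cs).1 < 2 ∨ (runSplit c ds).1 < (runSplit c cs).1)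
      · rw [if_pos hb, if_pos hb]
      · rw [if_neg hb, if_neg hb, hrec]
    · rw [if_pos hc, if_pos hc]
termination_by l _ => l.length
decreasing_by exact Nat.lt_succ_of_le (runSplit_len_le c cs)

theorem toList_ne_nil_of_ne_empty (s : String) (h : s ≠ "") : s.toList ≠ [] := by
  intro hc
  apply h
  have : s.toList = ("" : String).toList := by simpa using hc
  exact String.toList_injective this

-- ===== VERDICT (by name: the statement is the Claim_ definition above) =====
theorem solve_spec : Claim_equal_solve := by
  intro s t _ hpre
  unfold Spec_solve solve solve_alt
  obtain ⟨hs, ht⟩ := hpre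
  have hs' := toList_ne_nil_of_ne_empty s hs
  have ht' := toList_ne_nil_of_ne_empty t ht
  cases hsl : s.toList with
  | nil => exact absurd hsl hs'
  | cons a as =>
    cases htl : t.toList with
    | nil => exact absurd htl ht'
    | cons b bs =>
      simp only
      rw [buildA_eq_rle, buildA_eq_rle,
        cmpA_eq_cmpRuns _ _ (rle_counts_pos (a :: as)) (rle_counts_pos (b :: bs)),
        ← loopB_eq_cmpRuns]
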